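-- pv_equiv track=rewrite | github.com/Karan9083/Prectice_Python | Day1 to 100/Ass71.py | boast_count
-- ===== SOURCE A (Python) =====
-- def boast_count(scores):
--     count = 0
--     for i in range(len(scores)):
--         less_than_equal = sum(x <= scores[i] for x in scores)
--         greater_than = sum(x > scores[i] for x in scores)
--         if less_than_equal > greater_than:
--             count += 1
--     return count
-- ===== SOURCE B (Python) =====
-- def boast_count(scores):
--     if not scores:
--         return 0
--     m = sorted(scores)[len(scores) // 2]
--     return sum(1 for v in scores if v >= m)
-- ===== Notes on version B (the rewrite author's own statement) =====
-- stated objective: faster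
-- what changed: Instead of recounting <= and > comparisons for every element (nested scans), B sorts once, takes the element at index n//2 as a threshold, and counts elements >= that threshold in one pass.
import Mathlib
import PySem

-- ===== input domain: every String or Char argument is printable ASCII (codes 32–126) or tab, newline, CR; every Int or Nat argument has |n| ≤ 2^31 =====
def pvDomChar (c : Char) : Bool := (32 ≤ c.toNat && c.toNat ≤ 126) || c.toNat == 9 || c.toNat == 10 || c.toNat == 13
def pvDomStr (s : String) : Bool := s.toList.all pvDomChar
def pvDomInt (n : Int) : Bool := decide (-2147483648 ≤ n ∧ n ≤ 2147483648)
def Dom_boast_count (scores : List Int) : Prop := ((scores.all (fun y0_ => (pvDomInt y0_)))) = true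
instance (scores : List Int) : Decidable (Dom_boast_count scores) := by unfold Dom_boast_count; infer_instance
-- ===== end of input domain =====

-- B replaces A's nested comparison scans by one sort + a single threshold pass (measured faster; asymptotic change).


-- ===== PORT A =====
def boast_count (scores : List Int) : Int :=
  (PySem.List.pyRange 0 (scores.length : Int) 1).foldl (fun count i =>
    let si := PySem.List.pyGetD scores i 0
    let less_than_equal := (scores.map (fun x => if x ≤ si then (1 : Int) else 0)).sum
    let greater_than := (scores.map (fun x => if si < x then (1 : Int) else 0)).sum
    if less_than_equal > greater_than then count + 1 else count) 0

-- ===== PORT B =====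
def boast_count_alt (scores : List Int) : Int :=
  if scores = [] then 0
  else
    let m := PySem.List.pyGetD (PySem.List.sorted scores (fun x => x) false)
               (PySem.Int.floordiv (scores.length : Int) 2) 0
    (scores.map (fun v => if m ≤ v then (1 : Int) else 0)).sum

-- ===== PRECONDITION & SPEC =====
def Spec_boast_count (scores : List Int) (out : Int) : Prop := out = boast_count_alt scores
instance (scores : List Int) (out : Int) : Decidable (Spec_boast_count scores out) := by unfold Spec_boast_count; infer_instance

-- ===== CLAIM (what is proved, stated in full; the proofs are below) =====
def Claim_equal_boast_count : Prop := ∀ (scores : List Int), Dom_boast_count scores → Spec_boast_count scores (boast_count scores)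

-- ===== LEMMAS AND PROOFS =====

-- in a list with ≤-monotone entries, "at least k+1 elements are ≤ v" is exactly "the element at index k is ≤ v"
lemma countP_le_iff_getElem_le (s : List Int)
    (hmono : ∀ (p q : Nat) (hp : p < s.length) (hq : q < s.length), p ≤ q → s[p] ≤ s[q])
    (k : Nat) (hk : k < s.length) (v : Int) :
    k + 1 ≤ s.countP (fun x => decide (x ≤ v)) ↔ s[k] ≤ v := by
  constructor
  · intro h
    by_contra hv
    rw [not_le] at hv
    have hsplit : s.countP (fun x => decide (x ≤ v)) =
        (s.take k).countP (fun x => decide (x ≤ v)) + (s.drop k).countP (fun x => decide (x ≤ v)) := by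
      conv_lhs => rw [← List.take_append_drop k s]
      exact List.countP_append ..
    have hdrop : (s.drop k).countP (fun x => decide (x ≤ v)) = 0 := by
      rw [List.countP_eq_zero]
      intro a ha
      obtain ⟨j, hj, rfl⟩ := List.getElem_of_mem ha
      have hlen : (s.drop k).length = s.length - k := List.length_drop
      rw [List.getElem_drop]
      have hmono' : s[k] ≤ s[k + j] := hmono k (k + j) hk (by omega) (by omega)
      simp only [decide_eq_true_eq]
      omega
    have htake : (s.take k).countP (fun x => decide (x ≤ v)) ≤ k := by
      calc (s.take k).countP (fun x => decide (x ≤ v)) ≤ (s.take k).length := List.countP_le_length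
        _ ≤ k := by simp
    omega
  · intro h
    have hlen : (s.take (k + 1)).length = k + 1 := by
      rw [List.length_take]; omega
    have htake : (s.take (k + 1)).countP (fun x => decide (x ≤ v)) = k + 1 := by
      have hall : (s.take (k + 1)).countP (fun x => decide (x ≤ v)) = (s.take (k + 1)).length := by
        rw [List.countP_eq_length]
        intro a ha
        obtain ⟨j, hj, rfl⟩ := List.getElem_of_mem ha
        rw [List.getElem_take]
        have hjk : j ≤ k := by omega
        have hmono' : s[j]'(by omega) ≤ s[k] := hmono j k (by omega) hk hjk
        simp only [decide_eq_true_eq]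
        omega
      rw [hall, hlen]
    calc k + 1 = (s.take (k + 1)).countP (fun x => decide (x ≤ v)) := htake.symm
      _ ≤ s.countP (fun x => decide (x ≤ v)) := (List.take_sublist _ _).countP_le

-- the two complementary counts add up to the length
lemma countP_le_add_countP_gt (scores : List Int) (v : Int) :
    scores.countP (fun x => decide (x ≤ v)) + scores.countP (fun x => decide (v < x)) =
      scores.length := by
  rw [List.length_eq_countP_add_countP (fun x => decide (x ≤ v)) (l := scores)]
  congr 1
  apply List.countP_congr
  intro a _
  simp only [decide_eq_true_eq]
  omega

-- A's per-element test "count(≤ v) > count(> v)" coincides with B's test "v ≥ sorted(scores)[n//2]"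
lemma cond_iff (scores : List Int) (hne : scores ≠ []) (v : Int) :
    ((scores.map (fun x => if x ≤ v then (1 : Int) else 0)).sum >
        (scores.map (fun x => if v < x then (1 : Int) else 0)).sum) ↔
      PySem.List.pyGetD (PySem.List.sorted scores (fun x => x) false)
        (PySem.Int.floordiv (scores.length : Int) 2) 0 ≤ v := by
  have hle := PySem.List.sum_map_ite_one_zero (fun x => decide (x ≤ v)) scores
  have hgt := PySem.List.sum_map_ite_one_zero (fun x => decide (v < x)) scores
  simp only [decide_eq_true_eq] at hle hgt
  rw [hle, hgt]
  have hperm : (PySem.List.sorted scores (fun x => x) false).Perm scores :=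
    PySem.List.sorted_perm ..
  have hslen : (PySem.List.sorted scores (fun x => x) false).length = scores.length :=
    hperm.length_eq
  have hk : scores.length / 2 < (PySem.List.sorted scores (fun x => x) false).length := by
    rw [hslen]
    have : scores.length ≠ 0 := fun h => hne (List.eq_nil_of_length_eq_zero h)
    omega
  have hsum := countP_le_add_countP_gt scores v
  have hfd : PySem.Int.floordiv (scores.length : Int) 2 = ((scores.length / 2 : Nat) : Int) :=
    PySem.Int.floordiv_natCast scores.length 2
  rw [hfd, PySem.List.pyGetD_natCast, List.getD_eq_getElem _ _ hk]
  rw [← countP_le_iff_getElem_le (PySem.List.sorted scores (fun x => x) false)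
    (fun p q hp hq hpq => PySem.List.sorted_id_getElem_mono scores hpq hq)
    (scores.length / 2) hk v]
  rw [hperm.countP_eq]
  constructor
  · intro h
    have h' : scores.countP (fun x => decide (v < x)) < scores.countP (fun x => decide (x ≤ v)) := by
      exact_mod_cast h
    omega
  · intro h
    have h' : scores.countP (fun x => decide (v < x)) < scores.countP (fun x => decide (x ≤ v)) := by
      omega
    exact_mod_cast h'

-- A's index loop is a count of the elements satisfying its per-element test
lemma boast_count_eq_countP (scores : List Int) :
    boast_count scores = (scores.countP (fun v =>
      decide ((scores.map (fun x => if x ≤ v then (1 : Int) else 0)).sum >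
        (scores.map (fun x => if v < x then (1 : Int) else 0)).sum))) := by
  unfold boast_count
  show (PySem.List.pyRange 0 (scores.length : Int) 1).foldl
      (fun count i =>
        if (scores.map (fun x => if x ≤ PySem.List.pyGetD scores i 0 then (1 : Int) else 0)).sum >
            (scores.map (fun x => if PySem.List.pyGetD scores i 0 < x then (1 : Int) else 0)).sum
        then count + 1 else count) 0 = _
  rw [PySem.List.foldl_pyRange_zero_pyGetD' scores 0
    (fun count si =>
      if (scores.map (fun x => if x ≤ si then (1 : Int) else 0)).sum >
          (scores.map (fun x => if si < x then (1 : Int) else 0)).sum then count + 1 else count) 0]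
  rw [show (fun (count : Int) (si : Int) =>
      if (scores.map (fun x => if x ≤ si then (1 : Int) else 0)).sum >
          (scores.map (fun x => if si < x then (1 : Int) else 0)).sum then count + 1 else count) =
    (fun (count : Int) (si : Int) =>
      if (decide ((scores.map (fun x => if x ≤ si then (1 : Int) else 0)).sum >
          (scores.map (fun x => if si < x then (1 : Int) else 0)).sum)) = true
      then count + 1 else count) from by funext count si; simp]
  rw [PySem.List.foldl_count_if]
  simp

-- ===== VERDICT (by name: the statement is the Claim_ definition above) =====
theorem boast_count_spec : Claim_equal_boast_count := by
  intro scores _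
  unfold Spec_boast_count
  by_cases hne : scores = []
  · subst hne; decide
  · rw [boast_count_eq_countP]
    unfold boast_count_alt
    rw [if_neg hne]
    show _ = (scores.map (fun v =>
      if PySem.List.pyGetD (PySem.List.sorted scores (fun x => x) false)
          (PySem.Int.floordiv (scores.length : Int) 2) 0 ≤ v then (1 : Int) else 0)).sum
    rw [show (fun (v : Int) =>
        if PySem.List.pyGetD (PySem.List.sorted scores (fun x => x) false)
            (PySem.Int.floordiv (scores.length : Int) 2) 0 ≤ v then (1 : Int) else 0) =
      (fun (v : Int) =>
        if (decide (PySem.List.pyGetD (PySem.List.sorted scores (fun x => x) false)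
            (PySem.Int.floordiv (scores.length : Int) 2) 0 ≤ v)) = true then (1 : Int) else 0)
      from by funext v; simp]
    rw [PySem.List.sum_map_ite_one_zero]
    congr 1
    apply List.countP_congr
    intro v _
    simpa using cond_iff scores hne v
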